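-- pv_equiv track=rewrite | github.com/Kikuzawa/DSTU_VKB | Base_of_Information_Security/12 лаба/Trisemus_crypt.py | Trisemus_eng
-- ===== SOURCE A (Python) =====
-- def Trisemus_eng(text, key, flag):
--     try:
--         def generate_trisemus_matrix(keyword):
--             # Удаление повторяющихся символов из ключевого слова
--             keyword = list(''.join(sorted(set(keyword), key=keyword.index)))
--
--             alphabet = [chr(ord('A') + i) for i in range(26) if chr(ord('A') + i) not in keyword]
--             alphabet.append('-')
--             # Формирование матрицы
--             first_row = keyword + alphabet[:9 - len(keyword)]
--             k = len(alphabet[:9 - len(keyword)])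
--             alphabet = alphabet[k:]
--             matrix = [first_row]
--             for i in range(0, 2):
--                 matrix.append(alphabet[i * 9: (i + 1) * 9])
--
--             return matrix
--
--         def trisemus_encrypt(message, matrix):
--             # Шифрование сообщения с использованием шифра Трисемуса
--             result = ""
--             for char in message:
--                 for row in matrix:
--                     if char in row:
--                         index_char = row.index(char)
--                         index_row = matrix.index(row)
--                         result += matrix[(index_row + 1) % 3][index_char]
--                         break
--                 else:
--                     # Если символ не найден в матрице, добавляем его как есть
--                     result += char
--
--             return result
--
--         def trisemus_decrypt(message, matrix):
--             # Дешифрование сообщения с использованием шифра Трисемуса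
--             result = ""
--             for char in message:
--                 for row in matrix:
--                     if char in row:
--                         index_char = row.index(char)
--                         index_row = matrix.index(row)
--                         result += matrix[(index_row - 1) % 3][index_char]
--                         break
--                 else:
--                     # Если символ не найден в матрице, добавляем его как есть
--                     result += char
--
--             return result
--
--         # Пример использования
--         keyword = key.upper()
--         message = text.upper()
--         matrix = generate_trisemus_matrix(keyword)
--
--         encrypted_message = trisemus_encrypt(message, matrix)
--         decrypted_message = trisemus_decrypt(message, matrix)
--
--         match flag:
--             case 0:
--                 return str(encrypted_message)
--             case 1:
--                 return str(decrypted_message)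
--     except:
--         return "Ошибка :("
-- ===== SOURCE B (Python) =====
-- # Trisemus as a single 27-symbol cycle: rotating rows of the 3x9 grid by +-1
-- # while keeping the column is the same as shifting the row-major flattening by
-- # +-9 mod 27. So B never builds a matrix: it builds the flat 27-symbol sequence
-- # (key letters in first-occurrence order, then the unused alphabet, then '-')
-- # and substitutes each character by index arithmetic on that sequence.
-- def Trisemus_eng(text, key, flag):
--     shift = 9 if flag == 0 else 18 if flag == 1 else None  # decrypt: -9 == +18 (mod 27)
--     if shift is None:
--         return None
--     dedup = []
--     for ch in key.upper():
--         if ch not in dedup: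
--             dedup.append(ch)
--     rest = [c for c in "ABCDEFGHIJKLMNOPQRSTUVWXYZ-" if c not in dedup]
--     seq = (dedup + rest)[:27]
--     out = []
--     for ch in text.upper():
--         if ch in seq:
--             out.append(seq[(seq.index(ch) + shift) % 27])
--         else:
--             out.append(ch)
--     return ''.join(out)
-- ===== Notes on version B (the rewrite author's own statement) =====
-- stated objective: faster
-- what changed: B never builds the 3x9 matrix: rotating a row by +-1 while keeping the column is a shift by +-9 mod 27 in the row-major flattening, so B builds the flat 27-symbol sequence once and substitutes each character by index arithmetic on it, and computes only the requested direction instead of A's always computing both encrypt and decrypt with per-character row scans and row.index/matrix.index calls.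
-- outside the precondition, e.g. on Trisemus_eng('A', 'ABCDEFGHIJ0123456789!@#$%^', 0): A returns 'K', B returns 'J'; on Trisemus_eng('A', 'ABCDEFGHIJK', 0): A returns 'Ошибка :(', B returns 'J'
import Mathlib
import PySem

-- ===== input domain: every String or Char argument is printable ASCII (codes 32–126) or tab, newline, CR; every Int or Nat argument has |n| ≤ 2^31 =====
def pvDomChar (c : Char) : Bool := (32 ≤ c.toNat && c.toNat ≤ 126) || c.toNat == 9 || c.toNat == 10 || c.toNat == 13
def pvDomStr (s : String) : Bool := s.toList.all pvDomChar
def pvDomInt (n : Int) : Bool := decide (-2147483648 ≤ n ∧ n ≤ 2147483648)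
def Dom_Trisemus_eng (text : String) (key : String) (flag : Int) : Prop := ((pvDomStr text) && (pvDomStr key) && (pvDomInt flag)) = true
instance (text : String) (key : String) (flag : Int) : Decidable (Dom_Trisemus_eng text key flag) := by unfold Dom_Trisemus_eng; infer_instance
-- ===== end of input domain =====

-- B drops the 3×9 matrix entirely: rotating a row by ±1 while keeping the column equals a
-- shift by ±9 (mod 27) in the row-major flattening of the table, so B substitutes via index
-- arithmetic on one flat 27-symbol sequence and computes only the requested direction
-- (objective: faster — a timing run measured B faster by a constant factor).

-- ===== PORT A =====
-- generate_trisemus_matrix (A): sorted(set(kw), key=kw.index) is dedup-keeping-first order;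
-- key=kw.index always succeeds on elements of set(kw), so the (unreachable) .getD 0 is exact.
def pvGenMatrixA (keyword0 : List Char) : List (List Char) :=
  let keyword := PySem.List.sorted (PySem.Set.ofList keyword0)
      (fun c => (PySem.List.index? keyword0 c).getD 0) false
  let alphabet := (PySem.List.pyRange 0 26 1).foldl (fun acc i =>
      let ch := Char.ofNat ('A'.toNat + i.toNat)
      if ch ∈ keyword then acc else acc ++ [ch]) []
  let alphabet := alphabet ++ ['-']
  let firstRow := keyword ++ PySem.List.slice alphabet none (some (9 - (keyword.length : Int)))
  let k := (PySem.List.slice alphabet none (some (9 - (keyword.length : Int)))).length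
  let alphabet := PySem.List.slice alphabet (some (k : Int)) none
  let matrix := [firstRow]
  (PySem.List.pyRange 0 2 1).foldl (fun m i =>
      m ++ [PySem.List.slice alphabet (some (i * 9)) (some ((i + 1) * 9))]) matrix


-- the inner 'for row in matrix: if char in row: … break / else: add char' of
-- trisemus_encrypt / trisemus_decrypt (shift = +1 resp. -1); none = a raised exception
def pvScanA (full : List (List Char)) (shift : Int) : List (List Char) → Char → Option Char
  | [], ch => some ch
  | row :: rest, ch =>
    if ch ∈ row then
      match PySem.List.index? row ch, PySem.List.index? full row with
      | some ic, some ir =>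
        match PySem.List.pyGet? full (PySem.Int.mod ((ir : Int) + shift) 3) with
        | some trow => PySem.List.pyGet? trow (ic : Int)
        | none => none
      | _, _ => none
    else pvScanA full shift rest ch

-- the outer 'for char in message' loop accumulating result
def pvLoopA (matrix : List (List Char)) (shift : Int) : List Char → Option (List Char)
  | [] => some []
  | ch :: rest =>
    match pvScanA matrix shift matrix ch, pvLoopA matrix shift rest with
    | some c, some out => some (c :: out)
    | _, _ => none

def Trisemus_eng (text : String) (key : String) (flag : Int) : Option String :=
  let keyword := PySem.Chars.upper key.toList
  let message := PySem.Chars.upper text.toList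
  let matrix := pvGenMatrixA keyword
  match pvLoopA matrix 1 message, pvLoopA matrix (-1) message with
  | some e, some d =>
    if flag = 0 then some (String.ofList e)
    else if flag = 1 then some (String.ofList d)
    else none
  | _, _ => some "Ошибка :("

-- ===== PORT B =====
-- one character of Source B's substitution loop: seq[(seq.index(ch) + shift) % 27] if ch in seq,
-- else ch unchanged; seq always has exactly 27 elements, so the index is in range and the
-- .getD default is a totality fallback the Python never reaches
def pvSubstCharB (seq : List Char) (shift : Int) (ch : Char) : Char :=
  if ch ∈ seq then
    match PySem.List.index? seq ch with
    | some i => (PySem.List.pyGet? seq (PySem.Int.mod ((i : Int) + shift) 27)).getD ch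
    | none => ch
  else ch

def Trisemus_eng_alt (text : String) (key : String) (flag : Int) : Option String :=
  let shiftOpt : Option Int := if flag = 0 then some 9 else if flag = 1 then some 18 else none
  match shiftOpt with
  | none => none
  | some shift =>
    let dedup := (PySem.Chars.upper key.toList).foldl
        (fun acc ch => if ch ∈ acc then acc else acc ++ [ch]) []
    let rest := ("ABCDEFGHIJKLMNOPQRSTUVWXYZ-".toList).filter (fun c => decide (c ∉ dedup))
    let seq := (dedup ++ rest).take 27
    some (String.ofList ((PySem.Chars.upper text.toList).foldl
        (fun acc ch => acc ++ [pvSubstCharB seq shift ch]) []))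

-- ===== PRECONDITION & SPEC =====
-- Pre_ excludes keys with more than 9 distinct characters after uppercasing: there A's
-- first matrix row overflows and the three rows have unequal lengths, so A's result is
-- either its swallowed-IndexError string "Ошибка :(" or an accidental value of that
-- malformed table; B returns the flat-sequence substitution there.
def Pre_Trisemus_eng (text : String) (key : String) (flag : Int) : Prop :=
  (PySem.List.dedup (PySem.Chars.upper key.toList)).length ≤ 9
instance (text : String) (key : String) (flag : Int) : Decidable (Pre_Trisemus_eng text key flag) := by unfold Pre_Trisemus_eng; infer_instance

def pvWitness_Trisemus_eng : String × String × Int := ("HELLO, WORLD", "KEY", 0)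

def Spec_Trisemus_eng (text : String) (key : String) (flag : Int) (out : Option String) : Prop := out = Trisemus_eng_alt text key flag
instance (text : String) (key : String) (flag : Int) (out : Option String) : Decidable (Spec_Trisemus_eng text key flag out) := by unfold Spec_Trisemus_eng; infer_instance

-- ===== CLAIM =====
def Claim_equal_Trisemus_eng : Prop := ∀ (text : String) (key : String) (flag : Int), Dom_Trisemus_eng text key flag → Pre_Trisemus_eng text key flag → Spec_Trisemus_eng text key flag (Trisemus_eng text key flag)

-- ===== LEMMAS AND PROOFS =====
-- the A–Z letters and the flat 27-symbol table both programs realize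
def pvLetters : List Char := "ABCDEFGHIJKLMNOPQRSTUVWXYZ".toList
def pvFlat (kd : List Char) : List Char :=
  (kd ++ pvLetters.filter (fun c => decide (c ∉ kd)) ++ ['-']).take 27

theorem nodup_subset_length {l m : List Char} (h : l.Nodup) (hs : l ⊆ m) : l.length ≤ m.length := by
  calc l.length = l.toFinset.card := (List.toFinset_card_of_nodup h).symm
    _ ≤ m.toFinset.card := Finset.card_le_card (fun x hx => by
        simp only [List.mem_toFinset] at hx ⊢; exact hs hx)
    _ ≤ m.length := m.toFinset_card_le

theorem filter_length_split (l : List Char) (p : Char → Bool) :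
    (l.filter p).length + (l.filter (fun c => !(p c))).length = l.length := by
  induction l with
  | nil => rfl
  | cons x xs ih => by_cases h : p x <;> simp [h, ← ih] <;> omega

theorem letters_nodup : pvLetters.Nodup := by decide

theorem dash_not_letter : ('-' : Char) ∉ pvLetters := by decide

theorem F_length_ge (kd : List Char) (hnd : kd.Nodup) :
    26 - kd.length ≤ (pvLetters.filter (fun c => decide (c ∉ kd))).length := by
  have hsplit := filter_length_split pvLetters (fun c => decide (c ∉ kd))
  have hR : (pvLetters.filter (fun c => !(decide (c ∉ kd)))).length ≤ kd.length := by
    apply nodup_subset_length (List.Nodup.filter _ letters_nodup)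
    intro c hc
    have := List.of_mem_filter hc
    simpa using this
  have h26 : pvLetters.length = 26 := by decide
  omega

theorem F_length_ge_dash (kd : List Char) (hnd : kd.Nodup) (hdash : ('-' : Char) ∈ kd) :
    27 - kd.length ≤ (pvLetters.filter (fun c => decide (c ∉ kd))).length := by
  have hsplit := filter_length_split pvLetters (fun c => decide (c ∉ kd))
  have hR : (pvLetters.filter (fun c => !(decide (c ∉ kd)))).length ≤ kd.length - 1 := by
    have : (pvLetters.filter (fun c => !(decide (c ∉ kd)))).length ≤ (kd.erase '-').length := by
      apply nodup_subset_length (List.Nodup.filter _ letters_nodup)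
      intro c hc
      have hm := List.of_mem_filter hc
      have hcl := List.mem_of_mem_filter hc
      have hne : c ≠ '-' := fun he => dash_not_letter (he ▸ hcl)
      rw [List.mem_erase_of_ne hne]
      simpa using hm
    rwa [List.length_erase_of_mem hdash] at this
  have hpos : 1 ≤ kd.length := List.length_pos_of_mem hdash
  have h26 : pvLetters.length = 26 := by decide
  omega

theorem flat_eq (kd : List Char) (hnd : kd.Nodup) (hD : kd.length ≤ 9) :
    pvFlat kd = kd ++ (pvLetters.filter (fun c => decide (c ∉ kd)) ++ ['-']).take (27 - kd.length) := by
  unfold pvFlat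
  rw [List.append_assoc, List.take_append, List.take_of_length_le (by omega)]

theorem flat_length (kd : List Char) (hnd : kd.Nodup) (hD : kd.length ≤ 9) :
    (pvFlat kd).length = 27 := by
  rw [flat_eq kd hnd hD]
  have h1 := F_length_ge kd hnd
  simp only [List.length_append, List.length_take, List.length_singleton]
  omega

theorem flat_nodup (kd : List Char) (hnd : kd.Nodup) (hD : kd.length ≤ 9) :
    (pvFlat kd).Nodup := by
  rw [flat_eq kd hnd hD]
  have hFnd : (pvLetters.filter (fun c => decide (c ∉ kd))).Nodup := List.Nodup.filter _ letters_nodup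
  have hdF : ('-' : Char) ∉ pvLetters.filter (fun c => decide (c ∉ kd)) :=
    fun h => dash_not_letter (List.mem_of_mem_filter h)
  have halnd : (pvLetters.filter (fun c => decide (c ∉ kd)) ++ ['-']).Nodup :=
    List.Nodup.append hFnd (List.nodup_singleton _)
      (fun a haF had => hdF ((List.mem_singleton.mp had) ▸ haF))
  apply List.Nodup.append hnd (halnd.sublist (List.take_sublist _ _))
  intro a ha hb
  have hmem := List.mem_of_mem_take hb
  rcases List.mem_append.mp hmem with hF | hd
  · have := List.of_mem_filter hF
    simp only [decide_eq_true_eq] at this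
    exact this ha
  · rw [List.mem_singleton] at hd; subst hd
    have hge := F_length_ge_dash kd hnd ha
    have hin : ('-' : Char) ∈ (pvLetters.filter (fun c => decide (c ∉ kd))).take (27 - kd.length) := by
      rwa [List.take_append_of_le_length hge] at hb
    exact hdF (List.mem_of_mem_take hin)

theorem ofList_pairwise_index (xs : List Char) :
    (PySem.Set.ofList xs).Pairwise
      (fun a b => ((PySem.List.index? xs a).getD 0) < ((PySem.List.index? xs b).getD 0)) := by
  induction xs using List.reverseRecOn with
  | nil => simp [PySem.Set.ofList]
  | append_singleton xs x ih =>
    rw [PySem.Set.ofList_append_singleton]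
    by_cases hx : x ∈ PySem.Set.ofList xs
    · rw [PySem.Set.add_of_mem hx]
      refine ih.imp_of_mem ?_
      intro a b ha hb h
      rw [PySem.Set.mem_ofList] at ha hb
      rwa [PySem.List.index?_append_of_mem _ ha, PySem.List.index?_append_of_mem _ hb]
    · rw [PySem.Set.add_of_not_mem hx]
      have hx' : x ∉ xs := fun h => hx (by rw [PySem.Set.mem_ofList]; exact h)
      rw [List.pairwise_append]
      refine ⟨?_, List.pairwise_singleton _ _, ?_⟩
      · refine ih.imp_of_mem ?_
        intro a b ha hb h
        rw [PySem.Set.mem_ofList] at ha hb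
        rwa [PySem.List.index?_append_of_mem _ ha, PySem.List.index?_append_of_mem _ hb]
      · intro a ha b hb
        rw [PySem.Set.mem_ofList] at ha
        rw [List.mem_singleton] at hb; subst hb
        rw [PySem.List.index?_append_of_mem _ ha,
            PySem.List.index?_append_singleton_self xs b hx']
        obtain ⟨i, hi⟩ := Option.isSome_iff_exists.mp ((PySem.List.index?_isSome_iff xs a).mpr ha)
        obtain ⟨pre, suf, hxs, hlen, _⟩ := (PySem.List.index?_eq_some_iff xs a i).mp hi
        rw [hi]
        simp only [Option.getD_some]
        subst hxs hlen
        simp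

theorem dedupA_eq (xs : List Char) :
    PySem.List.sorted (PySem.Set.ofList xs)
      (fun c => (PySem.List.index? xs c).getD 0) false = PySem.Set.ofList xs := by
  apply PySem.List.sorted_eq_self_of_pairwise
  exact (ofList_pairwise_index xs).imp (fun h => Nat.le_of_lt h)

theorem alphA_eq (kd : List Char) :
    (PySem.List.pyRange 0 26 1).foldl (fun acc i =>
        let ch := Char.ofNat ('A'.toNat + i.toNat)
        if ch ∈ kd then acc else acc ++ [ch]) []
      = pvLetters.filter (fun c => decide (c ∉ kd)) := by
  have h1 : (PySem.List.pyRange 0 26 1).foldl (fun acc i =>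
        let ch := Char.ofNat ('A'.toNat + i.toNat)
        if ch ∈ kd then acc else acc ++ [ch]) []
      = (PySem.List.pyRange 0 26 1).foldl (fun acc i =>
        if (Char.ofNat ('A'.toNat + i.toNat)) ∉ kd
        then acc ++ [Char.ofNat ('A'.toNat + i.toNat)] else acc) [] := by
    apply List.foldl_ext
    intro acc x _
    by_cases h : (Char.ofNat ('A'.toNat + x.toNat)) ∈ kd <;> simp [h]
  rw [h1, PySem.List.foldl_append_ite]
  rw [show ((fun i : Int => decide ((Char.ofNat ('A'.toNat + i.toNat)) ∉ kd)))
      = ((fun c => decide (c ∉ kd)) ∘ (fun i : Int => Char.ofNat ('A'.toNat + i.toNat))) from rfl,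
    ← List.filter_map]
  rw [show ((PySem.List.pyRange 0 26 1).map (fun i => Char.ofNat ('A'.toNat + i.toNat))) = pvLetters by decide]
  simp

theorem matrixA_eq (kw : List Char) (hD : (PySem.Set.ofList kw).length ≤ 9) :
    pvGenMatrixA kw =
      [(pvFlat (PySem.Set.ofList kw)).take 9,
       ((pvFlat (PySem.Set.ofList kw)).drop 9).take 9,
       (pvFlat (PySem.Set.ofList kw)).drop 18] := by
  have hnd : (PySem.Set.ofList kw).Nodup := PySem.Set.nodup_ofList kw
  set kd := PySem.Set.ofList kw with hkd
  have h26 : pvLetters.length = 26 := by decide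
  have hFlen : 26 - kd.length ≤ (pvLetters.filter (fun c => decide (c ∉ kd))).length :=
    F_length_ge kd hnd
  simp only [pvGenMatrixA]
  rw [dedupA_eq, alphA_eq, ← hkd]
  rw [show PySem.List.pyRange 0 2 1 = [0, 1] from rfl]
  simp only [List.foldl_cons, List.foldl_nil]
  norm_num
  -- name the pieces
  set F := pvLetters.filter (fun c => decide (c ∉ kd)) with hF
  have h0 : (0 : Int) ≤ 9 - (kd.length : Int) := by omega
  rw [PySem.List.slice_to _ h0]
  have htn : ((9 : Int) - (kd.length : Int)).toNat = 9 - kd.length := by omega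
  rw [htn]
  rw [show (fun c => !decide (c ∈ kd)) = (fun c : Char => decide (c ∉ kd)) from by
    funext c; simp]
  rw [← hF]
  set al := F ++ ['-'] with hal
  have hallen : al.length = F.length + 1 := by simp [hal]
  have hk : (al.take (9 - kd.length)).length = 9 - kd.length := by
    rw [List.length_take]; omega
  rw [hk]
  rw [PySem.List.slice_to _ (by norm_num : (0:Int) ≤ 9),
      PySem.List.slice_toNat _ (by norm_num : (0:Int) ≤ 9) (by norm_num : (0:Int) ≤ 18)]
  rw [show ((9:Int)).toNat = 9 from rfl, show (Int.toNat 18 - 9 : Nat) = 9 from by decide]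
  rw [flat_eq kd hnd hD, ← hF, ← hal]
  have hdrop9 : ((kd ++ al.take (27 - kd.length)).drop 9)
      = (al.drop (9 - kd.length)).take 18 := by
    rw [List.drop_append, List.drop_eq_nil_of_le (by omega), List.drop_take]
    rw [show 27 - kd.length - (9 - kd.length) = 18 from by omega,
        show (9 : Nat) - kd.length = 9 - kd.length from rfl]
    simp
  refine ⟨?_, ?_, ?_⟩
  · conv_rhs => rw [List.take_append]
    rw [List.take_of_length_le hD, List.take_take,
        show min (9 - kd.length) (27 - kd.length) = 9 - kd.length from by omega]
  · rw [hdrop9, List.take_take]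
    norm_num
  · rw [show (18 : Nat) = 9 + 9 from rfl, ← List.drop_drop, hdrop9, List.drop_take]

theorem index?_append_right {l m : List Char} {v : Char} (hv : v ∉ l) :
    PySem.List.index? (l ++ m) v = (PySem.List.index? m v).map (· + l.length) := by
  induction l with
  | nil => simp [Option.map_id']
  | cons x xs ih =>
    have hne : x ≠ v := fun he => hv (he ▸ List.mem_cons_self)
    rw [List.cons_append, PySem.List.index?_cons_of_ne _ hne, ih (fun h => hv (List.mem_cons_of_mem _ h))]
    cases PySem.List.index? m v <;> simp <;> omega

theorem index?_lt_length {l : List Char} {v : Char} {k : Nat}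
    (h : PySem.List.index? l v = some k) : k < l.length := by
  obtain ⟨pre, suf, hl, hk, _⟩ := (PySem.List.index?_eq_some_iff l v k).mp h
  subst hl hk; simp

theorem scanA_eq (r0 r1 r2 : List Char) (h0 : r0.length = 9) (h1 : r1.length = 9)
    (h2 : r2.length = 9) (hnd : (r0 ++ r1 ++ r2).Nodup) (s t : Int)
    (hst : (s = 1 ∧ t = 9) ∨ (s = -1 ∧ t = 18)) (ch : Char) :
    pvScanA [r0, r1, r2] s [r0, r1, r2] ch = some (pvSubstCharB (r0 ++ r1 ++ r2) t ch) := by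
  rw [List.nodup_append, List.nodup_append] at hnd
  obtain ⟨⟨hn0, hn1, hd01⟩, hn2, hd012⟩ := hnd
  have hd02 : ∀ a ∈ r0, a ∉ r2 := fun a ha hb => hd012 a (List.mem_append_left _ ha) a hb rfl
  have hd12 : ∀ a ∈ r1, a ∉ r2 := fun a ha hb => hd012 a (List.mem_append_right _ ha) a hb rfl
  have hd01' : ∀ a ∈ r0, a ∉ r1 := fun a ha hb => hd01 a ha a hb rfl
  have hne01 : r0 ≠ r1 := by
    intro he
    obtain ⟨x, hx⟩ := List.exists_mem_of_ne_nil r0 (by intro h; rw [h] at h0; simp at h0)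
    exact hd01' x hx (he ▸ hx)
  have hne02 : r0 ≠ r2 := by
    intro he
    obtain ⟨x, hx⟩ := List.exists_mem_of_ne_nil r0 (by intro h; rw [h] at h0; simp at h0)
    exact hd02 x hx (he ▸ hx)
  have hne12 : r1 ≠ r2 := by
    intro he
    obtain ⟨x, hx⟩ := List.exists_mem_of_ne_nil r1 (by intro h; rw [h] at h1; simp at h1)
    exact hd12 x hx (he ▸ hx)
  by_cases hc0 : ch ∈ r0
  · obtain ⟨ic, hic⟩ := Option.isSome_iff_exists.mp ((PySem.List.index?_isSome_iff r0 ch).mpr hc0)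
    have hlt : ic < 9 := h0 ▸ index?_lt_length hic
    have hfmem : ch ∈ r0 ++ r1 ++ r2 := List.mem_append_left _ (List.mem_append_left _ hc0)
    have hfidx : PySem.List.index? (r0 ++ r1 ++ r2) ch = some ic := by
      rw [PySem.List.index?_append_of_mem _ (List.mem_append_left _ hc0),
          PySem.List.index?_append_of_mem _ hc0]
      exact hic
    have hrowidx : PySem.List.index? [r0, r1, r2] r0 = some 0 := PySem.List.index?_cons_self ..
    rcases hst with ⟨hs, ht⟩ | ⟨hs, ht⟩ <;> subst hs ht
    · have hm : PySem.Int.mod ((ic : Int) + 9) 27 = (((ic + 9 : Nat)) : Int) := by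
        rw [PySem.Int.mod_eq_emod_of_pos (by norm_num),
            Int.emod_eq_of_lt (by omega) (by omega)]
        push_cast; ring
      have hA : PySem.List.pyGet? [r0, r1, r2] (PySem.Int.mod (((0:Nat) : Int) + 1) 3) = some r1 := by
        rw [show PySem.Int.mod (((0:Nat) : Int) + 1) 3 = 1 from by decide]; rfl
      have hgetrow : PySem.List.pyGet? r1 ((ic : Nat) : Int) = some r1[ic] := by
        rw [PySem.List.pyGet?_natCast, List.getElem?_eq_getElem (by omega)]
      have hgetflat : PySem.List.pyGet? (r0 ++ r1 ++ r2) (((ic + 9 : Nat)) : Int) = some r1[ic] := by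
        rw [PySem.List.pyGet?_natCast, List.append_assoc,
            List.getElem?_append_right (by omega), List.getElem?_append_left (by omega),
            show ic + 9 - r0.length = ic from by omega, List.getElem?_eq_getElem (by omega)]
      simp only [pvScanA, if_pos hc0, hic, hrowidx, hA, hgetrow,
        pvSubstCharB, if_pos hfmem, hfidx, hm, hgetflat, Option.getD_some]
    · have hm : PySem.Int.mod ((ic : Int) + 18) 27 = (((ic + 18 : Nat)) : Int) := by
        rw [PySem.Int.mod_eq_emod_of_pos (by norm_num),
            Int.emod_eq_of_lt (by omega) (by omega)]
        push_cast; ring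
      have hA : PySem.List.pyGet? [r0, r1, r2] (PySem.Int.mod (((0:Nat) : Int) + -1) 3) = some r2 := by
        rw [show PySem.Int.mod (((0:Nat) : Int) + -1) 3 = 2 from by decide]; rfl
      have hgetrow : PySem.List.pyGet? r2 ((ic : Nat) : Int) = some r2[ic] := by
        rw [PySem.List.pyGet?_natCast, List.getElem?_eq_getElem (by omega)]
      have hgetflat : PySem.List.pyGet? (r0 ++ r1 ++ r2) (((ic + 18 : Nat)) : Int) = some r2[ic] := by
        rw [PySem.List.pyGet?_natCast,
            List.getElem?_append_right (by simp; omega),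
            show ic + 18 - (r0 ++ r1).length = ic from by simp; omega,
            List.getElem?_eq_getElem (by omega)]
      simp only [pvScanA, if_pos hc0, hic, hrowidx, hA, hgetrow,
        pvSubstCharB, if_pos hfmem, hfidx, hm, hgetflat, Option.getD_some]
  · by_cases hc1 : ch ∈ r1
    · obtain ⟨ic, hic⟩ := Option.isSome_iff_exists.mp ((PySem.List.index?_isSome_iff r1 ch).mpr hc1)
      have hlt : ic < 9 := h1 ▸ index?_lt_length hic
      have hfmem : ch ∈ r0 ++ r1 ++ r2 := List.mem_append_left _ (List.mem_append_right _ hc1)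
      have hfidx : PySem.List.index? (r0 ++ r1 ++ r2) ch = some (9 + ic) := by
        rw [PySem.List.index?_append_of_mem _ (List.mem_append_right _ hc1),
            index?_append_right hc0, hic]
        simp [h0]; omega
      have hrowidx : PySem.List.index? [r0, r1, r2] r1 = some 1 := by
        rw [PySem.List.index?_cons_of_ne _ hne01, PySem.List.index?_cons_self]; rfl
      rcases hst with ⟨hs, ht⟩ | ⟨hs, ht⟩ <;> subst hs ht
      · have hm : PySem.Int.mod (((9 + ic : Nat) : Int) + 9) 27 = (((ic + 18 : Nat)) : Int) := by
          rw [PySem.Int.mod_eq_emod_of_pos (by norm_num),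
              Int.emod_eq_of_lt (by omega) (by omega)]
          push_cast; ring
        have hA : PySem.List.pyGet? [r0, r1, r2] (PySem.Int.mod (((1:Nat) : Int) + 1) 3) = some r2 := by
          rw [show PySem.Int.mod (((1:Nat) : Int) + 1) 3 = 2 from by decide]; rfl
        have hgetrow : PySem.List.pyGet? r2 ((ic : Nat) : Int) = some r2[ic] := by
          rw [PySem.List.pyGet?_natCast, List.getElem?_eq_getElem (by omega)]
        have hgetflat : PySem.List.pyGet? (r0 ++ r1 ++ r2) (((ic + 18 : Nat)) : Int) = some r2[ic] := by
          rw [PySem.List.pyGet?_natCast,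
              List.getElem?_append_right (by simp; omega),
              show ic + 18 - (r0 ++ r1).length = ic from by simp; omega,
              List.getElem?_eq_getElem (by omega)]
        simp only [pvScanA, if_neg hc0, if_pos hc1, hic, hrowidx, hA, hgetrow,
          pvSubstCharB, if_pos hfmem, hfidx, hm, hgetflat, Option.getD_some]
      · have hm : PySem.Int.mod (((9 + ic : Nat) : Int) + 18) 27 = ((ic : Nat) : Int) := by
          rw [PySem.Int.mod_eq_emod_of_pos (by norm_num),
              show (((9 + ic : Nat) : Int) + 18) = (ic : Int) + 27 * 1 from by push_cast; ring,
              Int.add_mul_emod_self_left, Int.emod_eq_of_lt (by omega) (by omega)]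
        have hA : PySem.List.pyGet? [r0, r1, r2] (PySem.Int.mod (((1:Nat) : Int) + -1) 3) = some r0 := by
          rw [show PySem.Int.mod (((1:Nat) : Int) + -1) 3 = 0 from by decide]; rfl
        have hgetrow : PySem.List.pyGet? r0 ((ic : Nat) : Int) = some r0[ic] := by
          rw [PySem.List.pyGet?_natCast, List.getElem?_eq_getElem (by omega)]
        have hgetflat : PySem.List.pyGet? (r0 ++ r1 ++ r2) ((ic : Nat) : Int) = some r0[ic] := by
          rw [PySem.List.pyGet?_natCast, List.append_assoc,
              List.getElem?_append_left (by omega), List.getElem?_eq_getElem (by omega)]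
        simp only [pvScanA, if_neg hc0, if_pos hc1, hic, hrowidx, hA, hgetrow,
          pvSubstCharB, if_pos hfmem, hfidx, hm, hgetflat, Option.getD_some]
    · by_cases hc2 : ch ∈ r2
      · obtain ⟨ic, hic⟩ := Option.isSome_iff_exists.mp ((PySem.List.index?_isSome_iff r2 ch).mpr hc2)
        have hlt : ic < 9 := h2 ▸ index?_lt_length hic
        have hfmem : ch ∈ r0 ++ r1 ++ r2 := List.mem_append_right _ hc2
        have hfidx : PySem.List.index? (r0 ++ r1 ++ r2) ch = some (18 + ic) := by
          rw [index?_append_right (by simp [hc0, hc1]), hic]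
          simp [h0, h1]; omega
        have hrowidx : PySem.List.index? [r0, r1, r2] r2 = some 2 := by
          rw [PySem.List.index?_cons_of_ne _ hne02, PySem.List.index?_cons_of_ne _ hne12,
              PySem.List.index?_cons_self]; rfl
        rcases hst with ⟨hs, ht⟩ | ⟨hs, ht⟩ <;> subst hs ht
        · have hm : PySem.Int.mod (((18 + ic : Nat) : Int) + 9) 27 = ((ic : Nat) : Int) := by
            rw [PySem.Int.mod_eq_emod_of_pos (by norm_num),
                show (((18 + ic : Nat) : Int) + 9) = (ic : Int) + 27 * 1 from by push_cast; ring,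
                Int.add_mul_emod_self_left, Int.emod_eq_of_lt (by omega) (by omega)]
          have hA : PySem.List.pyGet? [r0, r1, r2] (PySem.Int.mod (((2:Nat) : Int) + 1) 3) = some r0 := by
            rw [show PySem.Int.mod (((2:Nat) : Int) + 1) 3 = 0 from by decide]; rfl
          have hgetrow : PySem.List.pyGet? r0 ((ic : Nat) : Int) = some r0[ic] := by
            rw [PySem.List.pyGet?_natCast, List.getElem?_eq_getElem (by omega)]
          have hgetflat : PySem.List.pyGet? (r0 ++ r1 ++ r2) ((ic : Nat) : Int) = some r0[ic] := by
            rw [PySem.List.pyGet?_natCast, List.append_assoc,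
                List.getElem?_append_left (by omega), List.getElem?_eq_getElem (by omega)]
          simp only [pvScanA, if_neg hc0, if_neg hc1, if_pos hc2, hic, hrowidx, hA, hgetrow,
            pvSubstCharB, if_pos hfmem, hfidx, hm, hgetflat, Option.getD_some]
        · have hm : PySem.Int.mod (((18 + ic : Nat) : Int) + 18) 27 = (((ic + 9 : Nat)) : Int) := by
            rw [PySem.Int.mod_eq_emod_of_pos (by norm_num),
                show (((18 + ic : Nat) : Int) + 18) = ((ic + 9 : Nat) : Int) + 27 * 1 from by push_cast; ring,
                Int.add_mul_emod_self_left, Int.emod_eq_of_lt (by omega) (by omega)]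
          have hA : PySem.List.pyGet? [r0, r1, r2] (PySem.Int.mod (((2:Nat) : Int) + -1) 3) = some r1 := by
            rw [show PySem.Int.mod (((2:Nat) : Int) + -1) 3 = 1 from by decide]; rfl
          have hgetrow : PySem.List.pyGet? r1 ((ic : Nat) : Int) = some r1[ic] := by
            rw [PySem.List.pyGet?_natCast, List.getElem?_eq_getElem (by omega)]
          have hgetflat : PySem.List.pyGet? (r0 ++ r1 ++ r2) (((ic + 9 : Nat)) : Int) = some r1[ic] := by
            rw [PySem.List.pyGet?_natCast, List.append_assoc,
                List.getElem?_append_right (by omega), List.getElem?_append_left (by omega),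
                show ic + 9 - r0.length = ic from by omega, List.getElem?_eq_getElem (by omega)]
          simp only [pvScanA, if_neg hc0, if_neg hc1, if_pos hc2, hic, hrowidx, hA, hgetrow,
            pvSubstCharB, if_pos hfmem, hfidx, hm, hgetflat, Option.getD_some]
      · have hnf : ch ∉ r0 ++ r1 ++ r2 := by
          intro h
          rcases List.mem_append.mp h with h | h
          · rcases List.mem_append.mp h with h | h
            · exact hc0 h
            · exact hc1 h
          · exact hc2 h
        simp only [pvScanA, if_neg hc0, if_neg hc1, if_neg hc2]
        rw [pvSubstCharB, if_neg hnf]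

theorem loopA_eq (r0 r1 r2 : List Char) (h0 : r0.length = 9) (h1 : r1.length = 9)
    (h2 : r2.length = 9) (hnd : (r0 ++ r1 ++ r2).Nodup) (s t : Int)
    (hst : (s = 1 ∧ t = 9) ∨ (s = -1 ∧ t = 18)) (msg : List Char) :
    pvLoopA [r0, r1, r2] s msg = some (msg.map (pvSubstCharB (r0 ++ r1 ++ r2) t)) := by
  induction msg with
  | nil => rfl
  | cons ch rest ih =>
    simp only [pvLoopA, scanA_eq r0 r1 r2 h0 h1 h2 hnd s t hst ch, ih, List.map_cons]

theorem seqB_eq (kd : List Char) (hnd : kd.Nodup) (hD : kd.length ≤ 9) :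
    (kd ++ (pvLetters ++ ['-']).filter (fun c => decide (c ∉ kd))).take 27 = pvFlat kd := by
  rw [List.filter_append]
  by_cases hdash : ('-' : Char) ∈ kd
  · have hge := F_length_ge_dash kd hnd hdash
    have hfe : (['-'].filter (fun c => decide (c ∉ kd))) = [] := by
      simp [List.filter_cons, hdash]
    rw [hfe, List.append_nil]
    unfold pvFlat
    have h27 : 27 ≤ (kd ++ List.filter (fun c => decide (c ∉ kd)) pvLetters).length := by
      simp only [List.length_append]; omega
    conv_rhs => rw [List.take_append_of_le_length h27]
  · have hfe : (['-'].filter (fun c => decide (c ∉ kd))) = ['-'] := by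
      simp [List.filter_cons, hdash]
    rw [hfe]
    unfold pvFlat
    rw [List.append_assoc]

theorem flat_rows (kd : List Char) (hnd : kd.Nodup) (hD : kd.length ≤ 9) :
    (pvFlat kd).take 9 ++ ((pvFlat kd).drop 9).take 9 ++ (pvFlat kd).drop 18 = pvFlat kd := by
  rw [List.append_assoc, show (18 : Nat) = 9 + 9 from rfl, ← List.drop_drop,
      List.take_append_drop, List.take_append_drop]

theorem dedupB_eq (xs : List Char) (acc : List Char) :
    xs.foldl (fun acc ch => if ch ∈ acc then acc else acc ++ [ch]) acc
      = xs.foldl PySem.Set.add acc := by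
  induction xs generalizing acc with
  | nil => rfl
  | cons x xs ih => simp only [List.foldl_cons, ih, PySem.Set.add_eq_ite]

theorem flatten_map_singleton (l : List Char) (f : Char → Char) :
    (l.map (fun x => [f x])).flatten = l.map f := by
  induction l with
  | nil => rfl
  | cons x xs ih => simp [ih]

theorem Trisemus_eng_ok (text key : String) (flag : Int)
    (hpre : Pre_Trisemus_eng text key flag) :
    Trisemus_eng text key flag = Trisemus_eng_alt text key flag := by
  unfold Pre_Trisemus_eng at hpre
  rw [PySem.List.dedup_eq_ofList] at hpre
  set kw := PySem.Chars.upper key.toList with hkw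
  set kd := PySem.Set.ofList kw with hkd
  have hnd : kd.Nodup := PySem.Set.nodup_ofList kw
  have hD : kd.length ≤ 9 := hpre
  have hflen : (pvFlat kd).length = 27 := flat_length kd hnd hD
  -- the three rows
  set r0 := (pvFlat kd).take 9 with hr0
  set r1 := ((pvFlat kd).drop 9).take 9 with hr1
  set r2 := (pvFlat kd).drop 18 with hr2
  have hl0 : r0.length = 9 := by rw [hr0, List.length_take]; omega
  have hl1 : r1.length = 9 := by rw [hr1, List.length_take, List.length_drop]; omega
  have hl2 : r2.length = 9 := by rw [hr2, List.length_drop]; omega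
  have hrows : r0 ++ r1 ++ r2 = pvFlat kd := by
    rw [hr0, hr1, hr2]; exact flat_rows kd hnd hD
  have hndf : (r0 ++ r1 ++ r2).Nodup := hrows ▸ flat_nodup kd hnd hD
  have hmat : pvGenMatrixA kw = [r0, r1, r2] := matrixA_eq kw (hkd ▸ hD)
  -- B's seq is pvFlat kd
  have hdedup : (PySem.Chars.upper key.toList).foldl
      (fun acc ch => if ch ∈ acc then acc else acc ++ [ch]) [] = kd := by
    rw [← hkw, dedupB_eq]; rfl
  have hletters : ("ABCDEFGHIJKLMNOPQRSTUVWXYZ-".toList) = pvLetters ++ ['-'] := by decide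
  have hseq : (kd ++ (pvLetters ++ ['-']).filter (fun c => decide (c ∉ kd))).take 27 = pvFlat kd :=
    seqB_eq kd hnd hD
  -- both loops
  have he := loopA_eq r0 r1 r2 hl0 hl1 hl2 hndf 1 9 (Or.inl ⟨rfl, rfl⟩) (PySem.Chars.upper text.toList)
  have hd := loopA_eq r0 r1 r2 hl0 hl1 hl2 hndf (-1) 18 (Or.inr ⟨rfl, rfl⟩) (PySem.Chars.upper text.toList)
  rw [hrows] at he hd
  simp only [Trisemus_eng, Trisemus_eng_alt]
  rw [← hkw, hmat, he, hd, hdedup, hletters, hseq]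
  by_cases hf0 : flag = 0
  · subst hf0
    simp [flatten_map_singleton]
  · by_cases hf1 : flag = 1
    · subst hf1
      simp [flatten_map_singleton]
    · simp [hf0, hf1]

-- ===== VERDICT =====
theorem Trisemus_eng_spec : Claim_equal_Trisemus_eng := by
  intro text key flag _ hpre
  unfold Spec_Trisemus_eng
  exact Trisemus_eng_ok text key flag hpre
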